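-- pv_equiv track=rewrite | github.com/kgruel/strange-loops | libs/cells/src/cells/search.py | filter_fuzzy
-- ===== SOURCE A (Python) =====
-- from typing import Sequence
--
-- def filter_fuzzy(items: Sequence[str], query: str) -> tuple[str, ...]:
--     """Filter items by fuzzy match (characters appear in order).
--
--     Example: "fb" matches "FooBar" because 'f' and 'b' appear in order.
--     """
--     if not query:
--         return tuple(items)
--
--     def matches(item: str, q: str) -> bool:
--         item_lower = item.lower()
--         q_lower = q.lower()
--         idx = 0
--         for char in q_lower:
--             idx = item_lower.find(char, idx)
--             if idx == -1:
--                 return False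
--             idx += 1
--         return True
--
--     return tuple(item for item in items if matches(item, query))
-- ===== SOURCE B (Python) =====
-- def filter_fuzzy(items, query):
--     if not query:
--         return tuple(items)
--     rq = query.lower()[::-1]
--     out = []
--     for item in items:
--         rem = rq
--         for ch in reversed(item.lower()):
--             if rem and ch == rem[0]:
--                 rem = rem[1:]
--         if not rem:
--             out.append(item)
--     return tuple(out)
-- ===== Notes on version B (the rewrite author's own statement) =====
-- stated objective: alternative
-- what changed: B inverts the scan: instead of looping over the query characters and advancing a str.find cursor into the item (A), B loops once over each item's characters in REVERSE order, greedily consuming the reversed query held as a shrinking remainder, and accepts when the remainder is empty; matches are collected with an explicit accumulator loop instead of a comprehension.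
import Mathlib
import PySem

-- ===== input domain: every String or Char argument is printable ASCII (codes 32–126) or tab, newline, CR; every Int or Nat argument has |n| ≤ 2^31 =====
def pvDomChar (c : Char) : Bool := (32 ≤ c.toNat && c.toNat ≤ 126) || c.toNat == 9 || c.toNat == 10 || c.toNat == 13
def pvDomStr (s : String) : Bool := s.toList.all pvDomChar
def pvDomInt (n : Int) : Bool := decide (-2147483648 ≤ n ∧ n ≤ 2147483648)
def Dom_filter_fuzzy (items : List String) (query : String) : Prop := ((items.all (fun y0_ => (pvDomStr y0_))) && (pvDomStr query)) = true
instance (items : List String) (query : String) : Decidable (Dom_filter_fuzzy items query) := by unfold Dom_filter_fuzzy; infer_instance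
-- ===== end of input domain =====

-- B replaces A's query-driven find-cursor scan by a single BACKWARD pass over each item that
-- greedily consumes the reversed query (remaining-suffix accumulator); objective: alternative.

-- ===== PORT A =====
-- the 'for char in q_lower' loop with the early 'return False': idx is the find cursor
def pvAMatchLoop (il : List Char) (q : List Char) (idx : Int) : Bool :=
  match q with
  | [] => true
  | c :: rest =>
      let j := PySem.Chars.findFrom il [c] idx none
      if j = -1 then false else pvAMatchLoop il rest (j + 1)

def pvAMatches (item : String) (q : String) : Bool :=
  pvAMatchLoop (PySem.Chars.lower item.toList) (PySem.Chars.lower q.toList) 0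

def filter_fuzzy (items : List String) (query : String) : List String :=
  if query.toList = [] then items
  else items.filter (fun item => pvAMatches item query)

-- ===== PORT B =====
-- the inner 'for ch in reversed(item.lower())' loop: rem is the unconsumed rest of rq
def pvBStep (rem : List Char) (ch : Char) : List Char :=
  match rem with
  | [] => []
  | c :: cs => if ch = c then cs else c :: cs

def filter_fuzzy_alt (items : List String) (query : String) : List String :=
  if query.toList = [] then items
  else
    let rq := (PySem.Chars.lower query.toList).reverse
    items.foldl
      (fun out item =>
        if (PySem.Chars.lower item.toList).reverse.foldl pvBStep rq = [] then out ++ [item]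
        else out) []

-- ===== PRECONDITION & SPEC =====
def Spec_filter_fuzzy (items : List String) (query : String) (out : List String) : Prop := out = filter_fuzzy_alt items query
instance (items : List String) (query : String) (out : List String) : Decidable (Spec_filter_fuzzy items query out) := by unfold Spec_filter_fuzzy; infer_instance

-- ===== CLAIM (what is proved, stated in full; the proofs are below) =====
def Claim_equal_filter_fuzzy : Prop := ∀ (items : List String) (query : String), Dom_filter_fuzzy items query → Spec_filter_fuzzy items query (filter_fuzzy items query)

-- ===== LEMMAS AND PROOFS =====

-- proof-only middleman: the forward greedy consumer
def pvFwd (q : List Char) (s : List Char) : Bool :=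
  match q, s with
  | [], _ => true
  | _ :: _, [] => false
  | c :: qs, x :: xs => if x = c then pvFwd qs xs else pvFwd (c :: qs) xs

-- ---- A's loop equals the forward greedy consumer ----

theorem pvFwd_of_not_infix (c : Char) (qs : List Char) :
    ∀ (s : List Char), ¬ [c] <:+: s → pvFwd (c :: qs) s = false := by
  intro s
  induction s with
  | nil => intro _; rfl
  | cons x xs ih =>
      intro h
      have hxc : x ≠ c := by
        intro he; subst he
        exact h (List.IsPrefix.isInfix ⟨xs, rfl⟩)
      rw [pvFwd, if_neg hxc]
      exact ih (fun hI => h (hI.trans (List.suffix_cons x xs).isInfix))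

theorem pvFwd_first (c : Char) (qs : List Char) :
    ∀ (m : Nat) (s : List Char), [c] <+: s.drop m → (∀ i < m, ¬ [c] <+: s.drop i) →
      pvFwd (c :: qs) s = pvFwd qs (s.drop (m + 1)) := by
  intro m
  induction m with
  | zero =>
      intro s hpre _
      obtain ⟨r, hr⟩ := hpre
      simp at hr
      subst hr
      simp [pvFwd]
  | succ m ih =>
      intro s hpre hmin
      cases s with
      | nil => simp at hpre
      | cons x xs =>
          have hxc : x ≠ c := by
            intro he; subst he
            exact hmin 0 (Nat.succ_pos m) ⟨xs, rfl⟩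
          rw [pvFwd, if_neg hxc]
          have := ih xs (by simpa using hpre) (fun i hi => by
            have := hmin (i + 1) (Nat.succ_lt_succ hi)
            simpa using this)
          simpa using this

theorem pvLoop_eq (il : List Char) :
    ∀ (q : List Char) (k : Nat), k ≤ il.length →
      pvAMatchLoop il q (k : Int) = pvFwd q (il.drop k) := by
  intro q
  induction q with
  | nil => intro k _; cases il.drop k <;> rfl
  | cons c qs ih =>
      intro k hk
      by_cases hneg : PySem.Chars.findFrom il [c] (k : Int) none = -1
      · have hni : ¬ [c] <:+: il.drop k :=
          (PySem.Chars.findFrom_natCast_eq_neg_one_iff il [c] k hk).mp hneg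
        rw [pvFwd_of_not_infix c qs (il.drop k) hni]
        simp [pvAMatchLoop, hneg]
      · obtain ⟨hle, hpre, hmin⟩ := PySem.Chars.findFrom_natCast_spec il [c] k hk hneg
        set j : Int := PySem.Chars.findFrom il [c] k none with hj
        have hj0 : 0 ≤ j := le_trans (Int.natCast_nonneg k) hle
        have hkj : k ≤ j.toNat := by omega
        have hlt : j.toNat < il.length := by
          have hne : il.drop j.toNat ≠ [] := by
            intro hnil; rw [hnil] at hpre; simp at hpre
          have hle2 : ¬ il.length ≤ j.toNat := fun h2 => hne (List.drop_eq_nil_of_le h2)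
          omega
        have hb : pvFwd (c :: qs) (il.drop k) = pvFwd qs (il.drop (j.toNat + 1)) := by
          have h1 : [c] <+: (il.drop k).drop (j.toNat - k) := by
            rw [List.drop_drop, Nat.add_sub_cancel' hkj]; exact hpre
          have h2 : ∀ i < j.toNat - k, ¬ [c] <+: (il.drop k).drop i := by
            intro i hi
            rw [List.drop_drop]
            exact hmin (k + i) (by omega) (by omega)
          have := pvFwd_first c qs (j.toNat - k) (il.drop k) h1 h2
          rw [this, List.drop_drop]
          have he : k + (j.toNat - k + 1) = j.toNat + 1 := by omega
          rw [he]
        rw [hb]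
        have hcast : j + 1 = ((j.toNat + 1 : Nat) : Int) := by omega
        simp only [pvAMatchLoop, ← hj, if_neg hneg, hcast]
        exact ih (j.toNat + 1) hlt

-- ---- the forward greedy consumer decides the sublist relation ----

theorem pvFwd_iff_sublist (q : List Char) :
    ∀ (s : List Char), pvFwd q s = true ↔ List.Sublist q s := by
  induction q with
  | nil => intro s; simp [pvFwd]
  | cons c qs ih =>
      intro s
      induction s with
      | nil => simp [pvFwd]
      | cons x xs ihs =>
          by_cases hx : x = c
          · subst hx
            rw [pvFwd, if_pos rfl, ih xs]
            exact ⟨fun h => h.cons₂ x, fun h => (List.cons_sublist_cons.mp h)⟩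
          · rw [pvFwd, if_neg hx, ihs]
            constructor
            · exact fun h => h.cons x
            · intro h
              cases h with
              | cons _ h => exact h
              | cons₂ => exact absurd rfl hx

-- ---- B's backward fold decides the sublist relation too ----

theorem pvBScan_nil (s : List Char) : s.foldl pvBStep [] = [] := by
  induction s with
  | nil => rfl
  | cons x xs ih => simpa [pvBStep] using ih

theorem pvBScan_iff_sublist (s : List Char) :
    ∀ (q : List Char), (s.foldl pvBStep q = []) ↔ List.Sublist q s := by
  induction s with
  | nil => intro q; cases q <;> simp
  | cons x xs ih =>
      intro q
      cases q with
      | nil => simp [pvBStep, pvBScan_nil, List.nil_sublist (x :: xs)]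
      | cons c cs =>
          by_cases hx : x = c
          · subst hx
            rw [List.foldl_cons, pvBStep, if_pos rfl, ih cs]
            exact ⟨fun h => h.cons₂ x, fun h => List.cons_sublist_cons.mp h⟩
          · rw [List.foldl_cons, pvBStep, if_neg hx, ih (c :: cs)]
            constructor
            · exact fun h => h.cons x
            · intro h
              cases h with
              | cons _ h => exact h
              | cons₂ => exact absurd rfl hx

-- the two membership tests agree item by item
theorem pvMatches_eq (item : String) (query : String) :
    pvAMatches item query =
      ((PySem.Chars.lower item.toList).reverse.foldl pvBStep
        ((PySem.Chars.lower query.toList).reverse) = [] : Bool) := by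
  unfold pvAMatches
  rw [show ((0 : Int) = ((0 : Nat) : Int)) from rfl,
    pvLoop_eq (PySem.Chars.lower item.toList) (PySem.Chars.lower query.toList) 0 (Nat.zero_le _)]
  simp only [List.drop_zero]
  have hiff : List.Sublist (PySem.Chars.lower query.toList).reverse
      (PySem.Chars.lower item.toList).reverse ↔
      List.Sublist (PySem.Chars.lower query.toList) (PySem.Chars.lower item.toList) :=
    List.reverse_sublist
  rcases hFwd : pvFwd (PySem.Chars.lower query.toList) (PySem.Chars.lower item.toList) with _ | _
  · have hns : ¬ List.Sublist (PySem.Chars.lower query.toList) (PySem.Chars.lower item.toList) := by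
      rw [← pvFwd_iff_sublist]; simp [hFwd]
    have hb : ¬ ((PySem.Chars.lower item.toList).reverse.foldl pvBStep
        ((PySem.Chars.lower query.toList).reverse) = []) := by
      rw [pvBScan_iff_sublist, hiff]; exact hns
    exact (decide_eq_false hb).symm
  · have hs : List.Sublist (PySem.Chars.lower query.toList) (PySem.Chars.lower item.toList) := by
      rw [← pvFwd_iff_sublist]; exact hFwd
    have hb : (PySem.Chars.lower item.toList).reverse.foldl pvBStep
        ((PySem.Chars.lower query.toList).reverse) = [] := by
      rw [pvBScan_iff_sublist, hiff]; exact hs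
    exact (decide_eq_true hb).symm

-- ===== VERDICT (by name: the statement is the Claim_ definition above) =====
theorem filter_fuzzy_spec : Claim_equal_filter_fuzzy := by
  intro items query _
  unfold Spec_filter_fuzzy filter_fuzzy filter_fuzzy_alt
  by_cases h : query.toList = []
  · simp [h]
  · simp only [if_neg h]
    rw [PySem.List.foldl_append_ite_eq_filter]
    simp only [List.nil_append]
    exact List.filter_congr (fun item _ => by rw [pvMatches_eq])
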